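-- pv_equiv track=rewrite | github.com/KurtMoan/aoc_2025 | Day04.py | array_processing
-- ===== SOURCE A (Python) =====
-- def array_processing(array):
--     array2 = [row.copy() for row in array]
--     for r in range(len(array)):
--         for c in range(len(array[0])):
--             if array[r][c] == '@':
--                 count = 0
--                 directions = [(-1, -1), (-1, 0), (-1, 1), (0, -1), (0, 1), (1, -1), (1, 0), (1, 1)]
--                 for dr, dc in directions:
--                     nr, nc = r + dr, c + dc
--                     if 0 <= nr < len(array) and 0 <= nc < len(array[0]) and array[nr][nc] == '@':
--                         count += 1
--                 if count < 4:
--                     array2[r][c] = 'x'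
--     return array2
-- ===== SOURCE B (Python) =====
-- def array_processing(array):
--     rows = len(array)
--     cols = len(array[0]) if rows else 0
--     count = [[0] * cols for _ in range(rows)]
--     for r in range(rows):
--         for c in range(cols):
--             if array[r][c] == '@':
--                 for dr in (-1, 0, 1):
--                     for dc in (-1, 0, 1):
--                         if (dr or dc) and 0 <= r + dr < rows and 0 <= c + dc < cols:
--                             count[r + dr][c + dc] += 1
--     return [[('x' if c < cols and row[c] == '@' and count[r][c] < 4 else row[c])
--              for c in range(len(row))]
--             for r, row in enumerate(array)]
-- ===== Notes on version B (the rewrite author's own statement) =====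
-- stated objective: alternative
-- what changed: B replaces A's per-cell gather (for every '@' cell, scan the 8 neighbors) with a two-pass scatter: it first builds a zero count grid and, for each '@' cell, increments the counts of its in-bounds neighbors, then rebuilds the grid in one pure pass marking '@' cells whose accumulated count is below 4; Pre_ excludes ragged grids with a row shorter than the first row, on which A raises IndexError.
import Mathlib
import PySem

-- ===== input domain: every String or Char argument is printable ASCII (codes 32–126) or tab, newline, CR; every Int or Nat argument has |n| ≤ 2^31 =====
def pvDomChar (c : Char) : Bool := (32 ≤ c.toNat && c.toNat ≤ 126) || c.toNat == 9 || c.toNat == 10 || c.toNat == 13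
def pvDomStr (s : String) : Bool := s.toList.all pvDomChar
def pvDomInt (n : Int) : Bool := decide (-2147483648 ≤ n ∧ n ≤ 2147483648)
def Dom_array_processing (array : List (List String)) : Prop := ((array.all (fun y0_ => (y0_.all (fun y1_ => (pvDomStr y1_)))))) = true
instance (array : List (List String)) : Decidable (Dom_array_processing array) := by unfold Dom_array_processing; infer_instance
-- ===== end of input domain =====

-- B replaces A's per-cell gather over the 8 neighbors (with in-place marking) by a scatter pass
-- that accumulates a neighbor-count grid and a pure second pass that marks the cells.

-- ===== PORT A =====
-- array[r][c]; every access the ports perform is guarded in range (by Pre_ or by explicit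
-- bounds checks), so the getD default is never the value that is used.
def pvGet (g : List (List String)) (r c : Nat) : String := (g.getD r []).getD c ""

def pvDirs : List (Int × Int) :=
  [(-1, -1), (-1, 0), (-1, 1), (0, -1), (0, 1), (1, -1), (1, 0), (1, 1)]

-- A's inner neighbor-count loop, verbatim
def pvCountA (array : List (List String)) (r c : Nat) : Nat :=
  pvDirs.foldl (fun cnt d =>
    if 0 ≤ (r : Int) + d.1 ∧ (r : Int) + d.1 < (array.length : Int) ∧
       0 ≤ (c : Int) + d.2 ∧ (c : Int) + d.2 < ((array.headD []).length : Int) ∧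
       pvGet array ((r : Int) + d.1).toNat ((c : Int) + d.2).toNat == "@"
    then cnt + 1 else cnt) 0

def array_processing (array : List (List String)) : List (List String) :=
  (List.range array.length).foldl (fun g2 r =>
    (List.range (array.headD []).length).foldl (fun g2 c =>
      if pvGet array r c == "@" then
        if pvCountA array r c < 4 then g2.set r ((g2.getD r []).set c "x") else g2
      else g2) g2) array

-- ===== PORT B =====
def pvOffs : List Int := [-1, 0, 1]

-- count[r][c] += 1
def pvBump (cnt : List (List Nat)) (r c : Nat) : List (List Nat) :=
  cnt.modify r (fun row => row.modify c (· + 1))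

-- the guarded increment of B's innermost loop body
def pvBumpIf (rows cols : Nat) (cnt : List (List Nat)) (r c : Nat) (dr dc : Int) : List (List Nat) :=
  if ¬(dr = 0 ∧ dc = 0) ∧ 0 ≤ (r : Int) + dr ∧ (r : Int) + dr < (rows : Int) ∧
     0 ≤ (c : Int) + dc ∧ (c : Int) + dc < (cols : Int)
  then pvBump cnt (((r : Int) + dr).toNat) (((c : Int) + dc).toNat) else cnt

-- scatter the contributions of one source cell (r, c) onto its in-bounds neighbors
def pvScatterCell (array : List (List String)) (rows cols : Nat)
    (cnt : List (List Nat)) (r c : Nat) : List (List Nat) :=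
  if pvGet array r c == "@" then
    pvOffs.foldl (fun cnt dr =>
      pvOffs.foldl (fun cnt dc => pvBumpIf rows cols cnt r c dr dc) cnt) cnt
  else cnt

-- cols = len(array[0]) if array else 0
def pvColsB (array : List (List String)) : Nat :=
  if array.length = 0 then 0 else (array.headD []).length

def pvCntGrid (array : List (List String)) : List (List Nat) :=
  (List.range array.length).foldl (fun cnt r =>
    (List.range (pvColsB array)).foldl (fun cnt c =>
      pvScatterCell array array.length (pvColsB array) cnt r c) cnt)
    (List.replicate array.length (List.replicate (pvColsB array) 0))

def array_processing_alt (array : List (List String)) : List (List String) :=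
  array.mapIdx (fun r row =>
    (List.range row.length).map (fun c =>
      if c < pvColsB array ∧ row.getD c "" == "@" ∧
         (((pvCntGrid array).getD r []).getD c 0) < 4
      then "x" else row.getD c ""))

-- ===== PRECONDITION & SPEC =====
-- Pre_ excludes exactly the ragged grids with a row shorter than the first row, on which the
-- Python A raises IndexError (it reads array[r][c] for every c < len(array[0])).
def Pre_array_processing (array : List (List String)) : Prop :=
  ∀ row ∈ array, (array.headD []).length ≤ row.length
instance (array : List (List String)) : Decidable (Pre_array_processing array) := by
  unfold Pre_array_processing; infer_instance
def pvWitness_array_processing : List (List String) := [["@", "@"], [".", "@"]]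
def Spec_array_processing (array : List (List String)) (out : List (List String)) : Prop := out = array_processing_alt array
instance (array : List (List String)) (out : List (List String)) : Decidable (Spec_array_processing array out) := by unfold Spec_array_processing; infer_instance

-- ===== CLAIM (what is proved, stated in full; the proofs are below) =====
def Claim_equal_array_processing : Prop := ∀ (array : List (List String)), Dom_array_processing array → Pre_array_processing array → Spec_array_processing array (array_processing array)

-- ===== LEMMAS AND PROOFS =====

-- the per-cell mark condition shared by both characterizations
def pvMark (array : List (List String)) (r c : Nat) : Bool :=
  (pvGet array r c == "@") && decide (pvCountA array r c < 4)

-- value of the count grid at (r, c)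
def gVal (g : List (List Nat)) (r c : Nat) : Nat := (g.getD r []).getD c 0

-- the count grid has rows rows, each of length cols
def gShape (g : List (List Nat)) (rows cols : Nat) : Prop :=
  g.length = rows ∧ ∀ i, i < rows → (g.getD i []).length = cols

-- 1 iff (i, j) is one of the 8 neighbors of (r, c)
def pvHit (i j r c : Nat) : Nat :=
  if ¬(i = r ∧ j = c) ∧ (i : Int) ≤ (r : Int) + 1 ∧ (r : Int) ≤ (i : Int) + 1 ∧
     (j : Int) ≤ (c : Int) + 1 ∧ (c : Int) ≤ (j : Int) + 1 then 1 else 0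

-- 1 iff the bump of pvBumpIf rows cols · i j dr dc lands on (r, c)
def pvInd (rows cols i j r c : Nat) (dr dc : Int) : Nat :=
  if (¬(dr = 0 ∧ dc = 0) ∧ 0 ≤ (i : Int) + dr ∧ (i : Int) + dr < (rows : Int) ∧
      0 ≤ (j : Int) + dc ∧ (j : Int) + dc < (cols : Int)) ∧
     ((i : Int) + dr).toNat = r ∧ ((j : Int) + dc).toNat = c then 1 else 0

theorem bump_row (g : List (List Nat)) (a b i : Nat) :
    (pvBump g a b).getD i [] =
      if a = i then (g.getD i []).modify b (· + 1) else g.getD i [] := by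
  rcases Nat.lt_or_ge i g.length with hi | hi
  · rw [List.getD_eq_getElem?_getD, pvBump, List.getElem?_modify,
      List.getElem?_eq_getElem hi, List.getD_eq_getElem _ _ hi]
    split <;> simp
  · have h1 : g[i]? = none := List.getElem?_eq_none hi
    have h2 : (pvBump g a b).getD i [] = [] := by
      rw [List.getD_eq_getElem?_getD, pvBump, List.getElem?_modify, h1]; rfl
    rw [h2, List.getD_eq_default _ _ hi]
    split <;> simp

theorem bump_shape (g : List (List Nat)) (rows cols a b : Nat) (hs : gShape g rows cols) :
    gShape (pvBump g a b) rows cols := by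
  obtain ⟨hl, hrow⟩ := hs
  refine ⟨by simpa [pvBump] using hl, ?_⟩
  intro i hi
  rw [bump_row]
  have h := hrow i hi
  split
  · rw [List.length_modify]; exact h
  · exact h

theorem modify_getD (row : List Nat) (b c : Nat) (hbl : b < row.length) :
    (row.modify b (· + 1)).getD c 0 = row.getD c 0 + (if b = c then 1 else 0) := by
  by_cases hbc : b = c
  · subst hbc
    rw [List.getD_eq_getElem?_getD, List.getElem?_modify, List.getElem?_eq_getElem hbl,
      List.getD_eq_getElem _ _ hbl]
    simp
  · rw [List.getD_eq_getElem?_getD, List.getElem?_modify,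
      List.getD_eq_getElem?_getD (l := row)]
    rcases h : row[c]? with _ | v <;> simp [hbc]

theorem bump_val (g : List (List Nat)) (rows cols a b r c : Nat) (hs : gShape g rows cols)
    (ha : a < rows) (hb : b < cols) :
    gVal (pvBump g a b) r c = gVal g r c + (if a = r ∧ b = c then 1 else 0) := by
  obtain ⟨hl, hrow⟩ := hs
  unfold gVal
  rw [bump_row]
  by_cases har : a = r
  · subst har
    have hbl : b < (g.getD a []).length := by rw [hrow a ha]; exact hb
    rw [if_pos rfl, modify_getD _ _ _ hbl]
    simp
  · simp [har]

theorem fold_shape {α : Type} (rows cols : Nat) (f : List (List Nat) → α → List (List Nat))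
    (l : List α) (hf : ∀ g x, gShape g rows cols → gShape (f g x) rows cols) :
    ∀ g, gShape g rows cols → gShape (l.foldl f g) rows cols := by
  induction l with
  | nil => intro g hg; exact hg
  | cons x l ih => intro g hg; exact ih _ (hf g x hg)

theorem fold_val {α : Type} (rows cols r c : Nat) (f : List (List Nat) → α → List (List Nat))
    (t : α → Nat) (l : List α)
    (hpres : ∀ g x, gShape g rows cols → gShape (f g x) rows cols)
    (hf : ∀ g x, gShape g rows cols → gVal (f g x) r c = gVal g r c + t x) :
    ∀ g, gShape g rows cols → gVal (l.foldl f g) r c = gVal g r c + (l.map t).sum := by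
  induction l with
  | nil => intro g hg; simp
  | cons x l ih =>
      intro g hg
      have h1 := hf g x hg
      have h2 := ih (f g x) (hpres g x hg)
      simp only [List.foldl_cons, List.map_cons, List.sum_cons]
      rw [h2, h1]; omega

theorem bumpIf_shape (rows cols : Nat) (g : List (List Nat)) (i j : Nat) (dr dc : Int)
    (hs : gShape g rows cols) : gShape (pvBumpIf rows cols g i j dr dc) rows cols := by
  unfold pvBumpIf
  split
  · exact bump_shape _ _ _ _ _ hs
  · exact hs

theorem bumpIf_val (rows cols : Nat) (g : List (List Nat)) (i j r c : Nat) (dr dc : Int)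
    (hs : gShape g rows cols) :
    gVal (pvBumpIf rows cols g i j dr dc) r c = gVal g r c + pvInd rows cols i j r c dr dc := by
  unfold pvBumpIf pvInd
  by_cases hq : ¬(dr = 0 ∧ dc = 0) ∧ 0 ≤ (i : Int) + dr ∧ (i : Int) + dr < (rows : Int) ∧
      0 ≤ (j : Int) + dc ∧ (j : Int) + dc < (cols : Int)
  · rw [if_pos hq, bump_val g rows cols _ _ r c hs (by omega) (by omega)]
    by_cases ht : ((i : Int) + dr).toNat = r ∧ ((j : Int) + dc).toNat = c
    · rw [if_pos ht, if_pos ⟨hq, ht⟩]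
    · rw [if_neg ht, if_neg (fun h => ht h.2)]
  · rw [if_neg hq, if_neg (fun h => hq h.1)]
    omega

theorem scatterCell_shape (array : List (List String)) (rows cols : Nat)
    (g : List (List Nat)) (i j : Nat) (hs : gShape g rows cols) :
    gShape (pvScatterCell array rows cols g i j) rows cols := by
  unfold pvScatterCell
  split
  · exact fold_shape rows cols _ pvOffs
      (fun g dr hg => fold_shape rows cols _ pvOffs
        (fun g dc hg' => bumpIf_shape rows cols g i j dr dc hg') g hg) g hs
  · exact hs

set_option maxHeartbeats 1600000 in
theorem nine_sum (rows cols i j r c : Nat) (hr : r < rows) (hc : c < cols) :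
    (pvOffs.map (fun dr => ((pvOffs.map (pvInd rows cols i j r c dr)).sum))).sum =
      pvHit i j r c := by
  have hind : ∀ dr dc : Int, pvInd rows cols i j r c dr dc =
      (if ¬(dr = 0 ∧ dc = 0) then 1 else 0) *
        ((if (i : Int) + dr = (r : Int) then 1 else 0) *
          (if (j : Int) + dc = (c : Int) then 1 else 0)) := by
    intro dr dc
    unfold pvInd
    split_ifs <;> omega
  simp only [hind, pvOffs, List.map_cons, List.map_nil, List.sum_cons, List.sum_nil]
  norm_num
  rw [pvHit]
  split_ifs <;> omega

theorem scatterCell_val (array : List (List String)) (rows cols : Nat)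
    (g : List (List Nat)) (i j r c : Nat) (hs : gShape g rows cols)
    (hr : r < rows) (hc : c < cols) :
    gVal (pvScatterCell array rows cols g i j) r c =
      gVal g r c + (if pvGet array i j == "@" then pvHit i j r c else 0) := by
  unfold pvScatterCell
  by_cases hat : pvGet array i j == "@"
  · rw [if_pos hat, if_pos hat]
    rw [fold_val rows cols r c _ (fun dr => (pvOffs.map (pvInd rows cols i j r c dr)).sum)
      pvOffs
      (fun g dr hg => fold_shape rows cols _ pvOffs
        (fun g dc hg' => bumpIf_shape rows cols g i j dr dc hg') g hg)
      (fun g dr hg => fold_val rows cols r c _ (pvInd rows cols i j r c dr) pvOffs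
        (fun g dc hg' => bumpIf_shape rows cols g i j dr dc hg')
        (fun g dc hg' => bumpIf_val rows cols g i j r c dr dc hg') g hg)
      g hs]
    rw [nine_sum rows cols i j r c hr hc]
  · rw [if_neg hat, if_neg hat]
    omega

theorem sum_map_add {α : Type} (l : List α) (f g : α → Nat) :
    (l.map (fun x => f x + g x)).sum = (l.map f).sum + (l.map g).sum := by
  induction l with
  | nil => rfl
  | cons x l ih => simp only [List.map_cons, List.sum_cons, ih]; omega

theorem sum_map_ite_zero {α : Type} (l : List α) (P : Prop) [Decidable P] (f : α → Nat) :
    (l.map (fun x => if P then f x else 0)).sum = if P then (l.map f).sum else 0 := by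
  split <;> simp

theorem range_delta_sum (n : Nat) (a : Int) (t : Nat → Nat) :
    ((List.range n).map (fun (i : Nat) => if (i : Int) = a then t i else 0)).sum =
      if 0 ≤ a ∧ a < (n : Int) then t a.toNat else 0 := by
  induction n with
  | zero => rw [if_neg (by omega)]; rfl
  | succ n ih =>
      rw [List.range_succ, List.map_append, List.sum_append, ih]
      simp only [List.map_cons, List.map_nil, List.sum_cons, List.sum_nil, add_zero]
      by_cases han : (n : Int) = a
      · have hn : a.toNat = n := by omega
        rw [if_neg (by omega), if_pos han, if_pos (by omega), hn]
        omega
      · rw [if_neg han, add_zero]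
        by_cases h0 : 0 ≤ a ∧ a < (n : Int)
        · rw [if_pos h0, if_pos (by omega)]
        · rw [if_neg h0, if_neg (by omega)]

theorem ite_and_mul (P Q : Prop) [Decidable P] [Decidable Q] :
    (if P ∧ Q then (1 : Nat) else 0) = (if P then 1 else 0) * (if Q then 1 else 0) := by
  by_cases hP : P <;> by_cases hQ : Q <;> simp [hP, hQ]

theorem ite_and_left (P Q : Prop) [Decidable P] [Decidable Q] (x : Nat) :
    (if P ∧ Q then x else 0) = if P then (if Q then x else 0) else 0 := by
  split_ifs <;> tauto

theorem foldl_count {α : Type} (q : α → Prop) [DecidablePred q] (l : List α) :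
    ∀ a : Nat, l.foldl (fun n x => if q x then n + 1 else n) a =
      a + (l.map (fun x => if q x then 1 else 0)).sum := by
  induction l with
  | nil => intro a; simp
  | cons x l ih =>
      intro a
      simp only [List.foldl_cons, List.map_cons, List.sum_cons, ih]
      split <;> omega

set_option maxHeartbeats 1600000 in
theorem pw (array : List (List String)) (i j r c : Nat) :
    (if pvGet array i j == "@" then pvHit i j r c else 0) =
      (pvDirs.map (fun d =>
        if (i : Int) = (r : Int) + d.1 ∧ (j : Int) = (c : Int) + d.2 ∧ pvGet array i j == "@"
        then 1 else 0)).sum := by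
  by_cases hat : pvGet array i j == "@"
  · simp only [pvDirs, List.map_cons, List.map_nil, List.sum_cons, List.sum_nil,
      hat, and_true, ite_and_mul]
    by_cases h1 : (i : Int) = (r : Int) + -1 <;>
      by_cases h2 : (i : Int) = (r : Int) + 0 <;>
        by_cases h3 : (i : Int) = (r : Int) + 1 <;>
          simp only [h1, h2, h3, if_true, if_false, ite_true, ite_false, one_mul, zero_mul,
            add_zero, zero_add, pvHit] <;>
            split_ifs <;> omega
  · simp [pvHit, hat]

set_option maxHeartbeats 1600000 in
theorem double_sum_eq_countA (array : List (List String)) (r c : Nat) :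
    ((List.range array.length).map (fun i =>
      ((List.range (array.headD []).length).map (fun j =>
        if pvGet array i j == "@" then pvHit i j r c else 0)).sum)).sum =
      pvCountA array r c := by
  simp only [pw array _ _ r c]
  simp only [pvCountA]
  simp only [foldl_count]
  simp only [pvDirs, List.map_cons, List.map_nil, List.sum_cons, List.sum_nil, add_zero,
    Nat.zero_add]
  try dsimp only
  simp only [ite_and_left, sum_map_add, sum_map_ite_zero, range_delta_sum]

theorem replicate_shape (rows cols : Nat) :
    gShape (List.replicate rows (List.replicate cols (0 : Nat))) rows cols := by
  refine ⟨List.length_replicate, ?_⟩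
  intro i hi
  rw [List.getD_eq_getElem _ _ (by simpa using hi)]
  simp

theorem replicate_val (rows cols r c : Nat) :
    gVal (List.replicate rows (List.replicate cols (0 : Nat))) r c = 0 := by
  unfold gVal
  have router : (List.replicate rows (List.replicate cols (0 : Nat))).getD r [] =
      if r < rows then List.replicate cols 0 else [] := by
    rw [List.getD_eq_getElem?_getD, List.getElem?_replicate]
    split <;> rfl
  rw [router]
  split
  · rw [List.getD_eq_getElem?_getD, List.getElem?_replicate]
    split <;> rfl
  · rfl

theorem cntGrid_val (array : List (List String)) (r c : Nat)
    (hr : r < array.length) (hc : c < pvColsB array) :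
    gVal (pvCntGrid array) r c = pvCountA array r c := by
  have hcols : pvColsB array = (array.headD []).length := by
    unfold pvColsB
    rw [if_neg (by omega)]
  unfold pvCntGrid
  rw [fold_val array.length (pvColsB array) r c _
    (fun i => ((List.range (pvColsB array)).map (fun j =>
      if pvGet array i j == "@" then pvHit i j r c else 0)).sum)
    (List.range array.length)
    (fun g i hg => fold_shape _ _ _ _
      (fun g j hg' => scatterCell_shape array _ _ g i j hg') g hg)
    (fun g i hg => fold_val _ _ r c _
      (fun j => if pvGet array i j == "@" then pvHit i j r c else 0)
      (List.range (pvColsB array))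
      (fun g j hg' => scatterCell_shape array _ _ g i j hg')
      (fun g j hg' => scatterCell_val array _ _ g i j r c hg' hr hc) g hg)
    _ (replicate_shape _ _)]
  rw [replicate_val, Nat.zero_add, hcols]
  exact double_sum_eq_countA array r c

-- ===== A-side characterization =====

theorem foldl_set_row (P : Nat → Prop) [DecidablePred P] (cs : List Nat) (r : Nat) :
    ∀ g : List (List String),
      cs.foldl (fun g c => if P c then g.set r ((g.getD r []).set c "x") else g) g =
        g.set r (cs.foldl (fun row c => if P c then row.set c "x" else row) (g.getD r [])) := by
  induction cs with
  | nil =>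
      intro g
      simp only [List.foldl_nil]
      rcases Nat.lt_or_ge r g.length with h | h
      · rw [List.getD_eq_getElem _ _ h, List.set_getElem_self]
      · rw [List.set_eq_of_length_le h]
  | cons c cs ih =>
      intro g
      simp only [List.foldl_cons]
      by_cases hP : P c
      · rw [if_pos hP, if_pos hP, ih, List.set_set]
        congr 1
        rcases Nat.lt_or_ge r g.length with h | h
        · congr 1
          rw [List.getD_eq_getElem?_getD, List.getElem?_set, if_pos rfl, if_pos h]
          rfl
        · rw [List.set_eq_of_length_le h, List.getD_eq_default _ _ h]
          simp
      · rw [if_neg hP, if_neg hP, ih]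

theorem foldl_set_length (P : Nat → Prop) [DecidablePred P] (cs : List Nat) :
    ∀ row : List String,
      (cs.foldl (fun row c => if P c then row.set c "x" else row) row).length = row.length := by
  induction cs with
  | nil => intro row; rfl
  | cons c cs ih =>
      intro row
      simp only [List.foldl_cons]
      split <;> simp [ih, List.length_set]

theorem foldl_set_getD (P : Nat → Prop) [DecidablePred P] (cs : List Nat) :
    ∀ (row : List String) (j : Nat),
      (cs.foldl (fun row c => if P c then row.set c "x" else row) row).getD j "" =
        if j ∈ cs ∧ P j ∧ j < row.length then "x" else row.getD j "" := by
  induction cs with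
  | nil => intro row j; simp
  | cons c cs ih =>
      intro row j
      simp only [List.foldl_cons]
      by_cases hP : P c
      · rw [if_pos hP, ih, List.length_set]
        by_cases hjc : j = c
        · subst hjc
          by_cases hjl : j < row.length
          · have h2 : (row.set j "x").getD j "" = "x" := by
              rw [List.getD_eq_getElem?_getD, List.getElem?_set, if_pos rfl, if_pos hjl]
              rfl
            rw [h2, ite_self, if_pos ⟨List.mem_cons_self, hP, hjl⟩]
          · have h2 : (row.set j "x").getD j "" = "" :=
              List.getD_eq_default _ _ (by rw [List.length_set]; exact Nat.le_of_not_lt hjl)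
            have h3 : row.getD j "" = "" := List.getD_eq_default _ _ (Nat.le_of_not_lt hjl)
            rw [h2, h3, if_neg (fun h => hjl h.2.2), if_neg (fun h => hjl h.2.2)]
        · have hset : (row.set c "x").getD j "" = row.getD j "" := by
            rw [List.getD_eq_getElem?_getD, List.getElem?_set,
              if_neg (fun h => hjc h.symm), List.getD_eq_getElem?_getD]
          rw [hset]
          refine if_congr ?_ rfl rfl
          simp [List.mem_cons, hjc]
      · rw [if_neg hP, ih]
        refine if_congr ?_ rfl rfl
        constructor
        · rintro ⟨h1, h2, h3⟩; exact ⟨List.mem_cons_of_mem _ h1, h2, h3⟩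
        · rintro ⟨h1, h2, h3⟩
          rcases List.mem_cons.mp h1 with h1 | h1
          · exact absurd h2 (h1 ▸ hP)
          · exact ⟨h1, h2, h3⟩

theorem foldl_rows_length (T : Nat → List String → List String) (rs : List Nat) :
    ∀ g : List (List String),
      (rs.foldl (fun g r => g.set r (T r (g.getD r []))) g).length = g.length := by
  induction rs with
  | nil => intro g; rfl
  | cons r rs ih => intro g; rw [List.foldl_cons, ih, List.length_set]

theorem foldl_rows_getD (T : Nat → List String → List String) (rs : List Nat) (h : rs.Nodup) :
    ∀ (g : List (List String)) (i : Nat),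
      (rs.foldl (fun g r => g.set r (T r (g.getD r []))) g).getD i [] =
        if i ∈ rs ∧ i < g.length then T i (g.getD i []) else g.getD i [] := by
  induction rs with
  | nil => intro g i; simp
  | cons r rs ih =>
      intro g i
      obtain ⟨hr, hnd⟩ := List.nodup_cons.mp h
      simp only [List.foldl_cons]
      rw [ih hnd, List.length_set]
      by_cases hir : i = r
      · subst hir
        have hnm : i ∉ rs := hr
        rw [if_neg (fun hx => hnm hx.1)]
        by_cases hil : i < g.length
        · have : (g.set i (T i (g.getD i []))).getD i [] = T i (g.getD i []) := by
            rw [List.getD_eq_getElem?_getD, List.getElem?_set, if_pos rfl, if_pos hil]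
            rfl
          rw [this, if_pos ⟨List.mem_cons_self, hil⟩]
        · have h0 : g.getD i [] = [] := List.getD_eq_default _ _ (Nat.le_of_not_lt hil)
          have : (g.set i (T i (g.getD i []))).getD i [] = [] := by
            rw [List.set_eq_of_length_le (Nat.le_of_not_lt hil), h0]
          rw [this, if_neg (fun hx => hil hx.2), h0]
      · have hset : (g.set r (T r (g.getD r []))).getD i [] = g.getD i [] := by
          rw [List.getD_eq_getElem?_getD, List.getElem?_set,
            if_neg (fun h' => hir h'.symm), List.getD_eq_getElem?_getD]
        rw [hset]
        refine if_congr ?_ rfl rfl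
        simp [List.mem_cons, hir]

-- the transformation A applies to row r
def pvT (array : List (List String)) (r : Nat) (row : List String) : List String :=
  (List.range (array.headD []).length).foldl
    (fun row c => if pvMark array r c then row.set c "x" else row) row

theorem A_inner_eq (array : List (List String)) (r : Nat) (g : List (List String)) :
    (List.range (array.headD []).length).foldl
      (fun g2 c => if pvGet array r c == "@" then
        if pvCountA array r c < 4 then g2.set r ((g2.getD r []).set c "x") else g2
      else g2) g
    = g.set r (pvT array r (g.getD r [])) := by
  have hfun : (fun (g2 : List (List String)) (c : Nat) => if pvGet array r c == "@" then
        if pvCountA array r c < 4 then g2.set r ((g2.getD r []).set c "x") else g2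
      else g2)
      = (fun (g2 : List (List String)) (c : Nat) =>
        if pvMark array r c then g2.set r ((g2.getD r []).set c "x") else g2) := by
    funext g2 c
    by_cases h1 : pvGet array r c == "@" <;> by_cases h2 : pvCountA array r c < 4 <;>
      simp [pvMark, h1, h2]
  rw [hfun, foldl_set_row (fun c => pvMark array r c = true)]
  rfl

theorem A_fold_eq (array : List (List String)) :
    array_processing array =
      (List.range array.length).foldl
        (fun g r => g.set r (pvT array r (g.getD r []))) array := by
  unfold array_processing
  exact PySem.List.foldl_congr_mem _ _ _ _ (fun acc x _ => A_inner_eq array x acc)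

theorem A_len (array : List (List String)) :
    (array_processing array).length = array.length := by
  rw [A_fold_eq]
  exact foldl_rows_length _ _ _

theorem A_row (array : List (List String)) (i : Nat) (hi : i < array.length) :
    (array_processing array).getD i [] = pvT array i (array.getD i []) := by
  rw [A_fold_eq, foldl_rows_getD _ _ List.nodup_range,
    if_pos ⟨List.mem_range.mpr hi, hi⟩]

theorem pvT_length (array : List (List String)) (i : Nat) (row : List String) :
    (pvT array i row).length = row.length :=
  foldl_set_length _ _ _

theorem array_processing_eq_alt (array : List (List String)) :
    array_processing array = array_processing_alt array := by
  apply List.ext_getElem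
  · rw [A_len]
    simp [array_processing_alt, List.length_mapIdx]
  · intro i h1 h2
    have hi : i < array.length := by rwa [A_len] at h1
    have hrow : array.getD i [] = array[i] := List.getD_eq_getElem _ _ hi
    have hL : (array_processing array)[i] = pvT array i (array.getD i []) := by
      rw [← List.getD_eq_getElem _ [] h1, A_row array i hi]
    rw [hL]
    unfold array_processing_alt
    rw [List.getElem_mapIdx]
    have hW0 : pvColsB array = (array.headD []).length := by
      unfold pvColsB
      rw [if_neg (by omega)]
    apply List.ext_getElem
    · rw [pvT_length, hrow, List.length_map, List.length_range]
    · intro j hj1 hj2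
      have hjlen : j < (array.getD i []).length := by rwa [pvT_length] at hj1
      rw [← List.getD_eq_getElem _ "" hj1]
      rw [List.getElem_map, List.getElem_range]
      unfold pvT
      rw [foldl_set_getD (fun c => pvMark array i c = true)]
      rw [← hrow]
      by_cases hjW : j < (array.headD []).length
      · have hgv : gVal (pvCntGrid array) i j = pvCountA array i j :=
          cntGrid_val array i j hi (by rw [hW0]; exact hjW)
        unfold gVal at hgv
        refine if_congr ?_ rfl rfl
        rw [hW0]
        constructor
        · rintro ⟨_, hm, _⟩
          have hm' := hm
          unfold pvMark at hm'
          simp only [Bool.and_eq_true, decide_eq_true_eq] at hm'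
          exact ⟨hjW, hm'.1, by rw [hgv]; exact hm'.2⟩
        · rintro ⟨_, hat, hcnt⟩
          refine ⟨List.mem_range.mpr hjW, ?_, hjlen⟩
          unfold pvMark
          simp only [Bool.and_eq_true, decide_eq_true_eq]
          exact ⟨hat, by rwa [hgv] at hcnt⟩
      · rw [if_neg (fun hx => hjW (List.mem_range.mp hx.1)),
          if_neg (fun hx => hjW (by rw [hW0] at hx; exact hx.1))]

-- ===== VERDICT (by name: the statement is the Claim_ definition above) =====
theorem array_processing_spec : Claim_equal_array_processing := by
  intro array _ _
  unfold Spec_array_processing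
  exact array_processing_eq_alt array
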